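-- pv_equiv track=rewrite | github.com/jtmach/AdventOfCode2019 | 20191204/20191204.py | passesRuleCheck
-- ===== SOURCE A (Python) =====
-- def passesRuleCheck(possiblePassword):
--     previousDigit = 0
--     containsAdjacentDigits = False
--     for digit in str(possiblePassword):
--         if int(digit) < previousDigit:
--             return False
--         if int(digit) == previousDigit:
--             containsAdjacentDigits = True
--         else:
--             previousDigit = int(digit)
--
--     return True and containsAdjacentDigits
-- ===== SOURCE B (Python) =====
-- def passesRuleCheck(possiblePassword):
--     # Pure arithmetic: peel digits off the right with divmod, no string conversion.
--     # prev holds the digit to the right of the current one (10 = sentinel, above any digit).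
--     n = possiblePassword
--     ok = True
--     pair = False
--     prev = 10
--     while True:
--         n, d = divmod(n, 10)
--         if d > prev:
--             ok = False
--         if d == prev:
--             pair = True
--         prev = d
--         if n == 0:
--             break
--     return ok and pair
-- ===== Notes on version B (the rewrite author's own statement) =====
-- stated objective: alternative
-- what changed: Replaced the str()-based left-to-right digit loop with pure arithmetic: divmod peels digits off the right, right-to-left, tracking order/pair flags against the previous (right) digit with no string conversion.
-- intended difference: For input 0, A returns True because the lone digit 0 matches its artificial previousDigit = 0 start; B returns False since a single digit has no adjacent equal pair, which is the intended rule. — e.g. on passesRuleCheck(0): A returns true, B returns false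
import Mathlib
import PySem

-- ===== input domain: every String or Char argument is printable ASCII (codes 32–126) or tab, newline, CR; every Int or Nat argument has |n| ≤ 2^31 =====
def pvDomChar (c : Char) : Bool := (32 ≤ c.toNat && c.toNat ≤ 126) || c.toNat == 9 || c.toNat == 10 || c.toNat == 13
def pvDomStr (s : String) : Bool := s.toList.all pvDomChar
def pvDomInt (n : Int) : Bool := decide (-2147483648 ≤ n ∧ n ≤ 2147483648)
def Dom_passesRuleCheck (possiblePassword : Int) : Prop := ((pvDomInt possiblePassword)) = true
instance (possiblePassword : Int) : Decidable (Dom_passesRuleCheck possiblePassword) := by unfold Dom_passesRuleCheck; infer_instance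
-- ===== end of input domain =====

-- B replaces A's str()-based left-to-right digit loop by pure arithmetic (divmod peels digits
-- right-to-left, no string conversion); at input 0 B returns the intended False (see D_ below).

-- ===== PORT A =====
-- int(digit) for one character of str(n); `none` (ValueError, on '-') is excluded by Pre_
def pvDigitVal (c : Char) : Int := (PySem.Int.ofChars? [c]).getD 0

def passesRuleCheckLoop : List Char → Int → Bool → Bool
  | [], _, containsAdjacentDigits => containsAdjacentDigits
  | c :: rest, previousDigit, containsAdjacentDigits =>
    if pvDigitVal c < previousDigit then false
    else if pvDigitVal c = previousDigit then passesRuleCheckLoop rest previousDigit true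
    else passesRuleCheckLoop rest (pvDigitVal c) containsAdjacentDigits

def passesRuleCheck (possiblePassword : Int) : Bool :=
  passesRuleCheckLoop (PySem.Int.toChars possiblePassword) 0 false

-- ===== PORT B =====
-- B's while-True/divmod loop; the fuel argument only makes the recursion total (each pass
-- divides n by 10, so natAbs + 1 passes always suffice on the admitted inputs).
def passesRuleCheckLoop_alt : Nat → Int → Bool → Bool → Int → Bool
  | 0, _, ok, pair, _ => ok && pair
  | fuel + 1, n, ok, pair, prev =>
    let n' := PySem.Int.floordiv n 10
    let d := PySem.Int.mod n 10
    let ok := if prev < d then false else ok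
    let pair := if d == prev then true else pair
    if n' == 0 then ok && pair
    else passesRuleCheckLoop_alt fuel n' ok pair d

def passesRuleCheck_alt (possiblePassword : Int) : Bool :=
  passesRuleCheckLoop_alt (possiblePassword.natAbs + 1) possiblePassword true false 10

-- ===== PRECONDITION & SPEC =====
-- A raises ValueError on negative inputs (int('-') on the sign character of str(n))
def Pre_passesRuleCheck (possiblePassword : Int) : Prop := 0 ≤ possiblePassword
instance (possiblePassword : Int) : Decidable (Pre_passesRuleCheck possiblePassword) := by
  unfold Pre_passesRuleCheck; infer_instance
def pvWitness_passesRuleCheck : Int := (122345)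

-- For input 0, A returns True because the lone digit 0 matches its artificial previousDigit = 0
-- start; B returns False since a single digit has no adjacent equal pair, the intended rule.
def D_passesRuleCheck (possiblePassword : Int) : Prop := possiblePassword = 0
instance (possiblePassword : Int) : Decidable (D_passesRuleCheck possiblePassword) := by
  unfold D_passesRuleCheck; infer_instance

def Spec_passesRuleCheck (possiblePassword : Int) (out : Bool) : Prop :=
  ¬ D_passesRuleCheck possiblePassword → out = passesRuleCheck_alt possiblePassword
instance (possiblePassword : Int) (out : Bool) : Decidable (Spec_passesRuleCheck possiblePassword out) := by unfold Spec_passesRuleCheck; infer_instance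

def pvDiffWitness_passesRuleCheck : Int := (0)
def pvDiffWitnessOut_passesRuleCheck : Bool × Bool := (true, false)

-- ===== CLAIM (what is proved, stated in full; the proofs are below) =====
def Claim_unchanged_passesRuleCheck : Prop := ∀ (possiblePassword : Int), Dom_passesRuleCheck possiblePassword → Pre_passesRuleCheck possiblePassword → Spec_passesRuleCheck possiblePassword (passesRuleCheck possiblePassword)
def Claim_changed_passesRuleCheck : Prop := Dom_passesRuleCheck (pvDiffWitness_passesRuleCheck) ∧ Pre_passesRuleCheck (pvDiffWitness_passesRuleCheck) ∧ D_passesRuleCheck (pvDiffWitness_passesRuleCheck) ∧ passesRuleCheck (pvDiffWitness_passesRuleCheck) = pvDiffWitnessOut_passesRuleCheck.1 ∧ passesRuleCheck_alt (pvDiffWitness_passesRuleCheck) = pvDiffWitnessOut_passesRuleCheck.2 ∧ pvDiffWitnessOut_passesRuleCheck.1 ≠ pvDiffWitnessOut_passesRuleCheck.2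
def Claim_exact_passesRuleCheck : Prop := ∀ (possiblePassword : Int), Dom_passesRuleCheck possiblePassword → Pre_passesRuleCheck possiblePassword → D_passesRuleCheck possiblePassword → passesRuleCheck possiblePassword ≠ passesRuleCheck_alt possiblePassword

-- ===== LEMMAS AND PROOFS =====

-- little-endian decimal digits of m (least significant first), as Ints
def pvDLE (m : Nat) : List Int :=
  if _h : m < 10 then [(m : Int)] else ((m % 10 : Nat) : Int) :: pvDLE (m / 10)
  decreasing_by exact Nat.div_lt_self (by omega) (by omega)

-- digits nondecreasing when read most-significant-first
def pvND (m : Nat) : Bool :=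
  if _h : m < 10 then true else (decide ((m / 10 % 10 : Nat) ≤ m % 10)) && pvND (m / 10)
  decreasing_by exact Nat.div_lt_self (by omega) (by omega)

-- some adjacent pair of equal digits
def pvAE (m : Nat) : Bool :=
  if _h : m < 10 then false else (decide ((m / 10 % 10 : Nat) = m % 10)) || pvAE (m / 10)
  decreasing_by exact Nat.div_lt_self (by omega) (by omega)

-- most significant digit
def pvMSD (m : Nat) : Nat :=
  if _h : m < 10 then m else pvMSD (m / 10)
  decreasing_by exact Nat.div_lt_self (by omega) (by omega)

-- one step of A's loop, state = none (already returned False) | some (previousDigit, adj flag)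
def pvStep : Option (Int × Bool) → Int → Option (Int × Bool)
  | none, _ => none
  | some (p, adj), d =>
    if d < p then none else if d = p then some (p, true) else some (d, adj)

lemma pvDigitVal_digitChar (d : Nat) (h : d < 10) :
    pvDigitVal (Nat.digitChar d) = (d : Int) := by
  interval_cases d <;> decide

lemma pvDLE_of_lt {m : Nat} (h : m < 10) : pvDLE m = [(m : Int)] := by
  rw [pvDLE, dif_pos h]

lemma pvDLE_of_ge {m : Nat} (h : ¬ m < 10) :
    pvDLE m = ((m % 10 : Nat) : Int) :: pvDLE (m / 10) := by
  rw [pvDLE, dif_neg h]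

lemma pvND_of_lt {m : Nat} (h : m < 10) : pvND m = true := by
  rw [pvND, dif_pos h]

lemma pvND_of_ge {m : Nat} (h : ¬ m < 10) :
    pvND m = ((decide ((m / 10 % 10 : Nat) ≤ m % 10)) && pvND (m / 10)) := by
  rw [pvND, dif_neg h]

lemma pvAE_of_lt {m : Nat} (h : m < 10) : pvAE m = false := by
  rw [pvAE, dif_pos h]

lemma pvAE_of_ge {m : Nat} (h : ¬ m < 10) :
    pvAE m = ((decide ((m / 10 % 10 : Nat) = m % 10)) || pvAE (m / 10)) := by
  rw [pvAE, dif_neg h]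

lemma pvMSD_of_lt {m : Nat} (h : m < 10) : pvMSD m = m := by
  rw [pvMSD, dif_pos h]

lemma pvMSD_of_ge {m : Nat} (h : ¬ m < 10) : pvMSD m = pvMSD (m / 10) := by
  rw [pvMSD, dif_neg h]

lemma map_toDigitsCore (fuel : Nat) :
    ∀ (n : Nat) (ds : List Char), n < 10 ^ fuel → 0 < fuel →
      (Nat.toDigitsCore 10 fuel n ds).map pvDigitVal = (pvDLE n).reverse ++ ds.map pvDigitVal := by
  induction fuel with
  | zero => intro n ds _ h0; omega
  | succ fuel ih =>
    intro n ds hn _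
    rw [Nat.toDigitsCore]
    by_cases h : n / 10 = 0
    · rw [if_pos h, List.map_cons, pvDigitVal_digitChar (n % 10) (by omega)]
      have hn10 : n < 10 := by omega
      rw [pvDLE_of_lt hn10, Nat.mod_eq_of_lt hn10]
      simp
    · rw [if_neg h, ih (n / 10) _ (by omega) (by
        rcases Nat.eq_zero_or_pos fuel with h0 | h0
        · subst h0; simp at hn; omega
        · exact h0)]
      have hn10 : ¬ n < 10 := by omega
      rw [pvDLE_of_ge hn10]
      rw [List.map_cons, pvDigitVal_digitChar (n % 10) (by omega)]
      simp

lemma map_toChars (n : Int) (hn : 0 ≤ n) :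
    (PySem.Int.toChars n).map pvDigitVal = (pvDLE n.toNat).reverse := by
  have h1 : ¬ n < 0 := by omega
  rw [PySem.Int.toChars, if_neg h1, Nat.toDigits,
      map_toDigitsCore (n.toNat + 1) n.toNat [] ?_ (by omega)]
  · simp
  · calc n.toNat < 10 ^ n.toNat := Nat.lt_pow_self (by omega)
      _ ≤ 10 ^ (n.toNat + 1) := Nat.pow_le_pow_right (by omega) (by omega)

-- A's loop is the fold of pvStep over the digit values
lemma loopA_eq_fold (cs : List Char) :
    ∀ (prev : Int) (adj : Bool),
      passesRuleCheckLoop cs prev adj =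
        (match (cs.map pvDigitVal).foldl pvStep (some (prev, adj)) with
         | none => false
         | some (_, a) => a) := by
  induction cs with
  | nil => intro prev adj; simp [passesRuleCheckLoop]
  | cons c rest ih =>
    intro prev adj
    simp only [passesRuleCheckLoop, List.map_cons, List.foldl_cons]
    by_cases h1 : pvDigitVal c < prev
    · rw [if_pos h1]
      have hs : pvStep (some (prev, adj)) (pvDigitVal c) = none := by
        simp only [pvStep]
        rw [if_pos h1]
      rw [hs]
      clear hs ih h1
      induction rest with
      | nil => simp
      | cons d t iht =>
        rw [List.map_cons, List.foldl_cons, show pvStep none (pvDigitVal d) = none from rfl]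
        exact iht
    · rw [if_neg h1]
      by_cases h2 : pvDigitVal c = prev
      · rw [if_pos h2, ih]
        have hs : pvStep (some (prev, adj)) (pvDigitVal c) = some (prev, true) := by
          simp only [pvStep]
          rw [if_neg h1, if_pos h2]
        rw [hs]
      · rw [if_neg h2, ih]
        have hs : pvStep (some (prev, adj)) (pvDigitVal c) = some (pvDigitVal c, adj) := by
          simp only [pvStep]
          rw [if_neg h1, if_neg h2]
        rw [hs]

-- the fold of pvStep over the big-endian digits, characterised by pvND / pvAE / pvMSD
lemma fold_digits (m : Nat) :
    (pvDLE m).reverse.foldl pvStep (some (0, false)) =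
      (if pvND m then some (((m % 10 : Nat) : Int), pvAE m || (pvMSD m == 0)) else none) := by
  induction m using Nat.strong_induction_on with
  | _ m ih =>
    by_cases h : m < 10
    · rw [pvDLE_of_lt h, pvND_of_lt h, pvAE_of_lt h, pvMSD_of_lt h, if_pos rfl]
      simp only [List.reverse_cons, List.reverse_nil, List.nil_append, List.foldl_cons,
        List.foldl_nil]
      rcases Nat.eq_zero_or_pos m with h0 | h0
      · subst h0; decide
      · have hlt : ¬ ((m : Int) < 0) := by omega
        have heq : ¬ ((m : Int) = 0) := by omega
        have hb : (m == 0) = false := by simp; omega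
        rw [pvStep, if_neg hlt, if_neg heq, Nat.mod_eq_of_lt h, hb]
        simp
    · rw [pvDLE_of_ge h, pvND_of_ge h, pvAE_of_ge h, pvMSD_of_ge h]
      simp only [List.reverse_cons, List.foldl_append, List.foldl_cons, List.foldl_nil]
      rw [ih (m / 10) (Nat.div_lt_self (by omega) (by omega))]
      by_cases hnd : pvND (m / 10) = true
      · rw [if_pos hnd]
        by_cases hlt : ((m % 10 : Nat) : Int) < ((m / 10 % 10 : Nat) : Int)
        · have hx : ¬ ((m / 10 % 10 : Nat) ≤ m % 10) := by omega
          rw [pvStep, if_pos hlt]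
          simp [hx, hnd]
        · by_cases heq : ((m % 10 : Nat) : Int) = ((m / 10 % 10 : Nat) : Int)
          · have he : m / 10 % 10 = m % 10 := by omega
            have hle : (m / 10 % 10 : Nat) ≤ m % 10 := by omega
            rw [pvStep, if_neg hlt, if_pos heq]
            simp [hnd, he, hle, heq]
          · have hne : ¬ (m / 10 % 10 = m % 10) := by omega
            have hle : (m / 10 % 10 : Nat) ≤ m % 10 := by omega
            rw [pvStep, if_neg hlt, if_neg heq]
            simp [hnd, hne, hle]
      · simp only [Bool.not_eq_true] at hnd
        simp [pvStep, hnd]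

-- B's loop equals the pvND/pvAE characterisation, with running flags and right sentinel
lemma loopB_eq (fuel : Nat) :
    ∀ (m : Nat) (ok pair : Bool) (prev : Int), m < 10 ^ fuel → 0 < fuel →
      passesRuleCheckLoop_alt fuel (m : Int) ok pair prev =
        ((ok && decide (((m % 10 : Nat) : Int) ≤ prev) && pvND m) &&
          (pair || (((m % 10 : Nat) : Int) == prev) || pvAE m)) := by
  induction fuel with
  | zero => intro m ok pair prev _ h0; omega
  | succ fuel ih =>
    intro m ok pair prev hm _
    have hdiv : PySem.Int.floordiv (m : Int) 10 = ((m / 10 : Nat) : Int) := by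
      rw [PySem.Int.floordiv]
      exact_mod_cast (Int.ofNat_fdiv m 10).symm
    have hmod : PySem.Int.mod (m : Int) 10 = ((m % 10 : Nat) : Int) := by
      rw [PySem.Int.mod]
      exact_mod_cast (Int.ofNat_fmod m 10).symm
    rw [passesRuleCheckLoop_alt]
    simp only [hdiv, hmod]
    by_cases h : m < 10
    · have h0 : m / 10 = 0 := by omega
      rw [if_pos (by simp [h0]), pvND_of_lt h, pvAE_of_lt h]
      by_cases hlt : prev < ((m % 10 : Nat) : Int)
      · have h1 : (decide (((m % 10 : Nat) : Int) ≤ prev)) = false := by simp; omega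
        have h2 : ((((m % 10 : Nat) : Int)) == prev) = false := by simp; omega
        rw [if_pos hlt, h1, h2]
        cases ok <;> cases pair <;> simp
      · rw [if_neg hlt]
        have h1 : (decide (((m % 10 : Nat) : Int) ≤ prev)) = true := by simp; omega
        rw [h1]
        by_cases heq : ((m % 10 : Nat) : Int) = prev
        · rw [if_pos (by simpa using heq)]
          have h2 : ((((m % 10 : Nat) : Int)) == prev) = true := by simpa using heq
          rw [h2]
          cases ok <;> cases pair <;> simp
        · rw [if_neg (by simpa using heq)]
          have h2 : ((((m % 10 : Nat) : Int)) == prev) = false := by simpa using heq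
          rw [h2]
          cases ok <;> cases pair <;> simp
    · have h0 : ¬ (m / 10 = 0) := by omega
      have hne0 : ¬ ((((m / 10 : Nat) : Int)) == 0) = true := by
        rw [beq_iff_eq]; omega
      rw [if_neg hne0]
      rw [ih (m / 10) _ _ _ (by
            rcases Nat.lt_or_ge (m / 10) (10 ^ fuel) with hf | hf
            · exact hf
            · exfalso
              have : 10 ^ fuel * 10 ≤ m / 10 * 10 := by omega
              have h2 : m / 10 * 10 ≤ m := Nat.div_mul_le_self m 10
              have h3 : 10 ^ (fuel + 1) = 10 ^ fuel * 10 := by ring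
              omega)
          (by
            rcases Nat.eq_zero_or_pos fuel with hf | hf
            · exfalso; subst hf; simp at hm; omega
            · exact hf)]
      rw [pvND_of_ge h, pvAE_of_ge h]
      have hle : (decide (((m / 10 % 10 : Nat) : Int) ≤ ((m % 10 : Nat) : Int)))
          = (decide ((m / 10 % 10 : Nat) ≤ m % 10)) := by
        by_cases hx : (m / 10 % 10 : Nat) ≤ m % 10 <;> simp [hx] <;> omega
      have heqb : ((((m / 10 % 10 : Nat) : Int)) == (((m % 10 : Nat) : Int)))
          = (decide ((m / 10 % 10 : Nat) = m % 10)) := by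
        by_cases hx : (m / 10 % 10 : Nat) = m % 10 <;> simp [hx] <;> omega
      rw [hle, heqb]
      by_cases hlt : prev < ((m % 10 : Nat) : Int)
      · have h1 : (decide (((m % 10 : Nat) : Int) ≤ prev)) = false := by simp; omega
        rw [if_pos hlt, h1]
        simp
      · rw [if_neg hlt]
        have h1 : (decide (((m % 10 : Nat) : Int) ≤ prev)) = true := by simp; omega
        rw [h1]
        by_cases heq : ((m % 10 : Nat) : Int) = prev
        · rw [if_pos (by simpa using heq)]
          have h2 : ((((m % 10 : Nat) : Int)) == prev) = true := by simpa using heq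
          rw [h2]
          cases ok <;> cases pair <;>
            simp [Bool.and_assoc, Bool.or_assoc]
        · rw [if_neg (by simpa using heq)]
          have h2 : ((((m % 10 : Nat) : Int)) == prev) = false := by simpa using heq
          rw [h2]
          cases ok <;> cases pair <;>
            simp [Bool.and_assoc, Bool.or_assoc]

lemma pvMSD_pos (m : Nat) (h : 0 < m) : 0 < pvMSD m := by
  induction m using Nat.strong_induction_on with
  | _ m ih =>
    by_cases h10 : m < 10
    · rw [pvMSD, dif_pos h10]; exact h
    · rw [pvMSD, dif_neg h10]
      exact ih (m / 10) (Nat.div_lt_self (by omega) (by omega)) (by omega)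

-- A's value on a nonnegative input, in the pvND/pvAE/pvMSD characterisation
lemma passesRuleCheck_char (n : Int) (hn : 0 ≤ n) :
    passesRuleCheck n = (pvND n.toNat && (pvAE n.toNat || (pvMSD n.toNat == 0))) := by
  rw [passesRuleCheck, loopA_eq_fold, map_toChars n hn, fold_digits]
  by_cases h : pvND n.toNat = true
  · simp [h]
  · simp only [Bool.not_eq_true] at h
    simp [h]

-- B's value on a nonnegative input, in the same characterisation (no pvMSD term)
lemma passesRuleCheck_alt_char (n : Int) (hn : 0 ≤ n) :
    passesRuleCheck_alt n = (pvND n.toNat && pvAE n.toNat) := by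
  rw [passesRuleCheck_alt]
  have hcast : ((n.toNat : Nat) : Int) = n := by omega
  have hfuel : n.toNat < 10 ^ (n.natAbs + 1) := by
    calc n.toNat < 10 ^ n.toNat := Nat.lt_pow_self (by omega)
      _ ≤ 10 ^ (n.natAbs + 1) := Nat.pow_le_pow_right (by omega) (by omega)
  have h := loopB_eq (n.natAbs + 1) n.toNat true false 10 hfuel (by omega)
  rw [hcast] at h
  rw [h]
  have h1 : (decide (((n.toNat % 10 : Nat) : Int) ≤ 10)) = true := by
    rw [decide_eq_true_iff]; omega
  have h2 : ((((n.toNat % 10 : Nat) : Int)) == 10) = false := by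
    rw [beq_eq_false_iff_ne]; omega
  rw [h1, h2]
  simp

-- ===== VERDICT (by name: the statement is the Claim_ definition above) =====
theorem passesRuleCheck_spec : Claim_unchanged_passesRuleCheck := by
  intro n _ hpre hd
  have hp : (0 : Int) ≤ n := hpre
  have hn0 : n ≠ 0 := hd
  rw [passesRuleCheck_char n hp, passesRuleCheck_alt_char n hp]
  have hpos : 0 < pvMSD n.toNat := pvMSD_pos n.toNat (by omega)
  have hmsd : (pvMSD n.toNat == 0) = false := by
    rw [beq_eq_false_iff_ne]; omega
  rw [hmsd]
  simp

theorem passesRuleCheck_changed : Claim_changed_passesRuleCheck := by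
  unfold Claim_changed_passesRuleCheck; decide

theorem passesRuleCheck_tight : Claim_exact_passesRuleCheck := by
  intro n _ _ hd
  rw [hd]
  decide
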